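-- pv_equiv track=rewrite | github.com/littleAvel/leetcode_problems | sorting/problem_2191.py | sortJumbled
-- ===== SOURCE A (Python) =====
-- from typing import List
--
-- def sortJumbled(mapping: List[int], nums: List[int]) -> List[int]:
--     store_pairs = []
--
--     for i in range(len(nums)):
--         mapped_value = 0
--         temp = nums[i]
--
--         place = 1
--         if temp == 0:
--             store_pairs.append((mapping[0], i))
--             continue
--         while temp != 0:
--             mapped_value = place * mapping[temp % 10] + mapped_value
--             place *= 10
--             temp //= 10
--         store_pairs.append((mapped_value, i))
--
--     store_pairs.sort()
--     answer = [nums[pair[1]] for pair in store_pairs]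
--
--     return answer
-- ===== SOURCE B (Python) =====
-- def sortJumbled(mapping, nums):
--     # Recursive Horner-style mapped value + stable index sort with a key,
--     # instead of A's place-multiplier while loop and decorated tuple sort.
--     def key(x):
--         if x < 10:
--             return mapping[x]
--         return key(x // 10) * 10 + mapping[x % 10]
--
--     order = sorted(range(len(nums)), key=lambda i: key(nums[i]))
--     return [nums[i] for i in order]
-- ===== Notes on version B (the rewrite author's own statement) =====
-- stated objective: simpler
-- what changed: B computes the mapped value by a recursive Horner scheme on x//10, x%10 (no place multiplier, no special case for 0) and obtains the order by a stable sort of the indices under that key, instead of A's explicit (value,index) tuple list that is built, sorted lexicographically and then projected.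
import Mathlib
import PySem

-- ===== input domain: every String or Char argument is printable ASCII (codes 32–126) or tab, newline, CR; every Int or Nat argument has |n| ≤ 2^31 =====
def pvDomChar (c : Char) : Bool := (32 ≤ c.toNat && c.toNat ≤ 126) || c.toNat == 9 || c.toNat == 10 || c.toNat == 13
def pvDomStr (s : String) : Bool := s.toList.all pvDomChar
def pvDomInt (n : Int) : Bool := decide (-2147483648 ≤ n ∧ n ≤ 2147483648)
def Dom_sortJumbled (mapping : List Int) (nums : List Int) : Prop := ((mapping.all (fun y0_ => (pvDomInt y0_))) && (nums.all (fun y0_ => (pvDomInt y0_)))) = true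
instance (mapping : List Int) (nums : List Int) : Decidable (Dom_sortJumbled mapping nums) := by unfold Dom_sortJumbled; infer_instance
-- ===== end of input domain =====

-- B replaces A's place-multiplier digit loop and decorated (value,index) tuple sort by a
-- recursive Horner key and a stable key-sort of the indices (objective: simpler).

-- ===== PORT A =====
-- Python's `while temp != 0: … temp //= 10` as Nat recursion: exact for temp ≥ 0;
-- for temp < 0 the Python loop never terminates, and Pre_ excludes those inputs.
def sortJumbledLoop (mapping : List Int) (t : Nat) (place acc : Int) : Int :=
  if t = 0 then acc
  else sortJumbledLoop mapping (t / 10) (place * 10)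
        (place * PySem.List.pyGetD mapping ((t % 10 : Nat) : Int) 0 + acc)
  termination_by t
  decreasing_by exact Nat.div_lt_self (Nat.pos_of_ne_zero (by assumption)) (by norm_num)

def sortJumbled (mapping : List Int) (nums : List Int) : List Int :=
  (PySem.List.sorted2
    ((PySem.List.pyRange 0 (nums.length : Int)).foldl
      (fun sp i =>
        if PySem.List.pyGetD nums i 0 = 0 then sp ++ [(PySem.List.pyGetD mapping 0 0, i)]
        else sp ++ [(sortJumbledLoop mapping (PySem.List.pyGetD nums i 0).toNat 1 0, i)]) [])
    Prod.fst Prod.snd).map (fun p => PySem.List.pyGetD nums p.2 0)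

-- ===== PORT B =====
-- key(x) = mapping[x] if x < 10 else key(x // 10) * 10 + mapping[x % 10]
def sortJumbledKey (mapping : List Int) (x : Int) : Int :=
  if x < 10 then PySem.List.pyGetD mapping x 0
  else sortJumbledKey mapping (PySem.Int.floordiv x 10) * 10
        + PySem.List.pyGetD mapping (PySem.Int.mod x 10) 0
  termination_by x.toNat
  decreasing_by
    rename_i h
    rw [PySem.Int.floordiv_of_nonneg (by norm_num : (0:Int) ≤ 10)]
    omega

def sortJumbled_alt (mapping : List Int) (nums : List Int) : List Int :=
  (PySem.List.sorted (PySem.List.pyRange 0 (nums.length : Int))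
      (fun i => sortJumbledKey mapping (PySem.List.pyGetD nums i 0))).map
    (fun i => PySem.List.pyGetD nums i 0)

-- ===== PRECONDITION & SPEC =====
-- Pre_ = exactly the inputs on which Python A returns: every number is nonnegative
-- (A's while loop never terminates on a negative number) and every decimal digit it uses
-- as an index (including index 0 for the number 0) is inside mapping (else IndexError).
def Pre_sortJumbled (mapping : List Int) (nums : List Int) : Prop :=
  ∀ x ∈ nums, 0 ≤ x ∧ (x = 0 → mapping ≠ []) ∧ ∀ d ∈ Nat.digits 10 x.toNat, d < mapping.length
instance (mapping : List Int) (nums : List Int) : Decidable (Pre_sortJumbled mapping nums) := by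
  unfold Pre_sortJumbled; infer_instance

def pvWitness_sortJumbled : List Int × List Int :=
  ([8, 9, 4, 0, 2, 1, 3, 5, 7, 6], [991, 338, 38, 0])

def Spec_sortJumbled (mapping : List Int) (nums : List Int) (out : List Int) : Prop := out = sortJumbled_alt mapping nums
instance (mapping : List Int) (nums : List Int) (out : List Int) : Decidable (Spec_sortJumbled mapping nums out) := by unfold Spec_sortJumbled; infer_instance

-- ===== CLAIM (what is proved, stated in full; the proofs are below) =====
def Claim_equal_sortJumbled : Prop := ∀ (mapping : List Int) (nums : List Int), Dom_sortJumbled mapping nums → Pre_sortJumbled mapping nums → Spec_sortJumbled mapping nums (sortJumbled mapping nums)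

-- ===== LEMMAS AND PROOFS =====

-- A's while loop computes `place * key + acc` of the Horner key, for any nonzero Nat input.
theorem sortJumbledLoop_eq_key (mapping : List Int) :
    ∀ t : Nat, t ≠ 0 → ∀ place acc : Int,
      sortJumbledLoop mapping t place acc = place * sortJumbledKey mapping (t : Int) + acc := by
  intro t
  induction t using Nat.strong_induction_on with
  | _ t ih =>
    intro ht place acc
    by_cases hlt : t < 10
    · rw [sortJumbledLoop, if_neg ht, sortJumbledLoop,
        if_pos (by omega : t / 10 = 0)]
      rw [sortJumbledKey, if_pos (by exact_mod_cast hlt)]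
      have : t % 10 = t := Nat.mod_eq_of_lt hlt
      rw [this]
    · rw [sortJumbledLoop, if_neg ht]
      rw [ih (t / 10) (Nat.div_lt_self (Nat.pos_of_ne_zero ht) (by norm_num))
        (by omega) (place * 10) _]
      conv_rhs => rw [sortJumbledKey]
      rw [if_neg (by exact_mod_cast hlt)]
      have h1 : PySem.Int.floordiv (t : Int) 10 = ((t / 10 : Nat) : Int) := by
        exact_mod_cast PySem.Int.floordiv_natCast t 10
      have h2 : PySem.Int.mod (t : Int) 10 = ((t % 10 : Nat) : Int) := by
        simp [PySem.Int.mod, Int.fmod_eq_emod]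
      rw [h1, h2]; ring

-- the lexicographic "before" test sorted2 uses, and the key one sorted uses
def lexB : (Int × Int) → (Int × Int) → Bool :=
  fun a b => decide (a.1 < b.1) || !decide (b.1 < a.1) && decide (a.2 < b.2)

def keyB (f : Int → Int) : Int → Int → Bool := fun a b => decide (f a < f b)

def decPair (f : Int → Int) : Int → Int × Int := fun i => (f i, i)

-- inserting a decorated element whose index is above everything present:
-- the lexicographic insert is the stable key insert.
theorem insertBy_decPair (f : Int → Int) (x : Int) :
    ∀ acc : List Int, (∀ y ∈ acc, y < x) →
      PySem.List.insertBy lexB (decPair f x) (acc.map (decPair f))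
        = (PySem.List.insertBy (keyB f) x acc).map (decPair f) := by
  intro acc
  induction acc with
  | nil => intro _; rfl
  | cons y ys ih =>
    intro h
    have hy : y < x := h y (by simp)
    simp only [List.map_cons, PySem.List.insertBy]
    have hcond : lexB (decPair f x) (decPair f y) = keyB f x y := by
      simp [lexB, keyB, decPair, show ¬ (x < y) by omega]
    rw [hcond]
    cases hkb : keyB f x y with
    | true => simp
    | false =>
      simp only [Bool.false_eq_true, if_false, List.map_cons, List.cons.injEq, true_and]
      exact ih (fun z hz => h z (by simp [hz]))

theorem foldl_insertBy_decPair (f : Int → Int) :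
    ∀ (l acc : List Int), l.Pairwise (· < ·) → (∀ x ∈ l, ∀ y ∈ acc, y < x) →
      (l.map (decPair f)).foldl (fun a p => PySem.List.insertBy lexB p a) (acc.map (decPair f))
        = (l.foldl (fun a x => PySem.List.insertBy (keyB f) x a) acc).map (decPair f) := by
  intro l
  induction l with
  | nil => intro acc _ _; rfl
  | cons x l' ih =>
    intro acc hp h
    simp only [List.map_cons, List.foldl_cons]
    rw [insertBy_decPair f x acc (h x (by simp))]
    refine ih (PySem.List.insertBy (keyB f) x acc) (List.Pairwise.of_cons hp) ?_
    intro z hz y hy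
    rcases (PySem.List.insertBy_mem_iff (keyB f) x y acc).mp hy with rfl | hmem
    · exact (List.pairwise_cons.mp hp).1 z hz
    · exact h z (by simp [hz]) y hmem

-- sorted2 on the decorated index list = decorated stable key-sort of the indices
theorem sorted2_decPair (f : Int → Int) (l : List Int) (hp : l.Pairwise (· < ·)) :
    PySem.List.sorted2 (l.map (decPair f)) Prod.fst Prod.snd
      = (PySem.List.sorted l f).map (decPair f) := by
  have h2 : PySem.List.sorted2 (l.map (decPair f)) Prod.fst Prod.snd
      = (l.map (decPair f)).foldl (fun a p => PySem.List.insertBy lexB p a) [] := rfl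
  rw [h2, PySem.List.sorted_eq_foldl_insertBy]
  have := foldl_insertBy_decPair f l [] hp (by intro _ _ y hy; simp at hy)
  simpa [keyB] using this

theorem sortJumbled_spec' (mapping nums : List Int) (hpre : Pre_sortJumbled mapping nums) :
    sortJumbled mapping nums = sortJumbled_alt mapping nums := by
  unfold sortJumbled sortJumbled_alt
  set n := nums.length with hn
  set f : Int → Int := fun i => sortJumbledKey mapping (PySem.List.pyGetD nums i 0) with hf
  have hidx := PySem.List.pyRange_zero_nat n
  -- the pair-building loop is a map of the decorating function
  have hbody : (fun (sp : List (Int × Int)) (i : Int) =>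
      if PySem.List.pyGetD nums i 0 = 0 then sp ++ [(PySem.List.pyGetD mapping 0 0, i)]
      else sp ++ [(sortJumbledLoop mapping (PySem.List.pyGetD nums i 0).toNat 1 0, i)])
      = fun sp i => sp ++ [((if PySem.List.pyGetD nums i 0 = 0 then PySem.List.pyGetD mapping 0 0
          else sortJumbledLoop mapping (PySem.List.pyGetD nums i 0).toNat 1 0), i)] := by
    funext sp i; by_cases h : PySem.List.pyGetD nums i 0 = 0 <;> simp [h]
  rw [hbody, PySem.List.foldl_append_singleton_eq_map, List.nil_append]
  -- on the indices actually used, the decoration is decPair f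
  have hdec : ((PySem.List.pyRange 0 (n : Int)).map
      (fun i => ((if PySem.List.pyGetD nums i 0 = 0 then PySem.List.pyGetD mapping 0 0
          else sortJumbledLoop mapping (PySem.List.pyGetD nums i 0).toNat 1 0), i)))
      = (PySem.List.pyRange 0 (n : Int)).map (decPair f) := by
    refine List.map_congr_left ?_
    intro i hi
    rw [hidx] at hi
    simp only [List.mem_map, List.mem_range] at hi
    obtain ⟨k, hk, rfl⟩ := hi
    simp only [decPair, hf, Prod.mk.injEq, and_true]
    have hmem : PySem.List.pyGetD nums (k : Int) 0 ∈ nums := by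
      rw [PySem.List.pyGetD_natCast]
      have hk' : k < nums.length := by omega
      rw [show nums.getD k 0 = nums[k] from by
        simp [List.getD, List.getElem?_eq_getElem hk']]
      exact List.getElem_mem hk'
    have hx0 : 0 ≤ PySem.List.pyGetD nums (k : Int) 0 := (hpre _ hmem).1
    generalize hgen : PySem.List.pyGetD nums (k : Int) 0 = t at hx0 ⊢
    by_cases h0 : t = 0
    · rw [if_pos h0, h0, sortJumbledKey, if_pos (by norm_num)]
    · rw [if_neg h0]
      have htn : t.toNat ≠ 0 := by omega
      rw [sortJumbledLoop_eq_key mapping t.toNat htn 1 0, Int.toNat_of_nonneg hx0]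
      ring
  rw [hdec]
  have hpair : (PySem.List.pyRange 0 (n : Int)).Pairwise (· < ·) := by
    rw [hidx]
    refine List.Pairwise.map _ ?_ (List.pairwise_lt_range)
    intro a b hab; exact_mod_cast hab
  rw [sorted2_decPair f _ hpair, List.map_map]
  rfl

-- ===== VERDICT (by name: the statement is the Claim_ definition above) =====
theorem sortJumbled_spec : Claim_equal_sortJumbled := by
  intro mapping nums _ hpre
  exact sortJumbled_spec' mapping nums hpre
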